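-- pv_equiv track=rewrite | github.com/andersen-mats/uio | IN1000/trix/06/billigste_butikk.py | finn_butikk
-- ===== SOURCE A (Python) =====
-- def finn_butikk(handleliste, prisliste, butikker):
--     total = 0
--     for i in range(len(prisliste)):
--         for vare in handleliste:
--             total += prisliste[i][vare]
--         if i == 0:
--             butikk = i
--             billigst = total
--         elif total < billigst:
--             butikk = i
--             billigst = total
--         total = 0
--     return butikker[butikk]
-- ===== SOURCE B (Python) =====
-- def finn_butikk(handleliste, prisliste, butikker):
--     totaler = [0] * len(prisliste)
--     for vare in handleliste:
--         totaler = [t + priser[vare] for t, priser in zip(totaler, prisliste)]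
--     rekkefolge = sorted(range(len(prisliste)), key=lambda i: totaler[i])
--     return butikker[rekkefolge[0]]
-- ===== Notes on version B (the rewrite author's own statement) =====
-- stated objective: alternative
-- what changed: A's store-major fused loop with a running minimum and reset accumulator is replaced by an item-major (transposed) accumulation -- one totals vector updated once per shopping-list item across all stores -- followed by a stable sort of the store indices by total, taking the first index (stability keeps the earliest store on ties, matching A's strict <).
-- outside the precondition, e.g. on finn_butikk([], [{}, {}], ['x']): A returns 'x', B returns 'x'
import Mathlib
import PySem

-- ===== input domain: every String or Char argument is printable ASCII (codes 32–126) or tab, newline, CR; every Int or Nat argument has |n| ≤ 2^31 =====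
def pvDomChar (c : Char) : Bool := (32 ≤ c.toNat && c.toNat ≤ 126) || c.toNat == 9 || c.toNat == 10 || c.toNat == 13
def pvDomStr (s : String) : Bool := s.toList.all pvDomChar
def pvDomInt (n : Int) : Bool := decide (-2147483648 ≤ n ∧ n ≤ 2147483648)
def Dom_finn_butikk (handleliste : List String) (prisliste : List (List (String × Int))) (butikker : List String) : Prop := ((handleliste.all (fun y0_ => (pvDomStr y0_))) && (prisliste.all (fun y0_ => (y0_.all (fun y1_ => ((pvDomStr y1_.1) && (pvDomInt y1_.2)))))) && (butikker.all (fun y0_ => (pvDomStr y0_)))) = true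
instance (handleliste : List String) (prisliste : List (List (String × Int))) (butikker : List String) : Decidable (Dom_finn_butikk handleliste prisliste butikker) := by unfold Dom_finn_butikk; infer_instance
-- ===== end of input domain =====

-- B replaces A's store-major fused running-minimum loop by an item-major (transposed) totals
-- accumulation followed by a stable sort of the store indices by total (objective: alternative).
-- ===== PORT A =====
-- Literal port of A: the loop state is (total, butikk, billigst); total is reset to 0 at each
-- iteration exactly as in the source. The dummy initial butikk/billigst 0 are unreachable values:
-- the i == 0 iteration initialises them (Pre_ requires prisliste ≠ []). `.getD` defaults stand
-- where Python raises (missing key / index out of range), which Pre_finn_butikk excludes.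
def finn_butikk (handleliste : List String) (prisliste : List (List (String × Int))) (butikker : List String) : String :=
  let s := (PySem.List.pyRange 0 (prisliste.length : Int) 1).foldl
    (fun (st : Int × Int × Int) i =>
      let total := handleliste.foldl
        (fun t vare => t + ((((PySem.List.pyGet? prisliste i).getD []).lookup vare).getD 0)) st.1
      if i == 0 then (0, i, total)
      else if total < st.2.2 then (0, i, total)
      else (0, st.2.1, st.2.2))
    (0, 0, 0)
  (PySem.List.pyGet? butikker s.2.1).getD ""

-- ===== PORT B =====
-- Literal port of Source B: totals vector updated once per shopping-list item (the zip comprehension),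
-- then sorted(range(n), key=totals)[0] — PySem.List.sorted is stable exactly like Python's, so the
-- first index of the sorted order is the earliest store with minimal total. On empty prisliste
-- Python's rekkefolge[0] raises IndexError; the `none` branch (excluded by Pre_finn_butikk) stands for that.
def finn_butikk_alt (handleliste : List String) (prisliste : List (List (String × Int))) (butikker : List String) : String :=
  let totaler := handleliste.foldl
    (fun tot vare => (tot.zip prisliste).map (fun p => p.1 + ((p.2.lookup vare).getD 0)))
    (List.replicate prisliste.length (0 : Int))
  let rekkefolge := PySem.List.sorted (PySem.List.pyRange 0 (prisliste.length : Int) 1)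
    (fun i => (PySem.List.pyGet? totaler i).getD 0) false
  match PySem.List.pyGet? rekkefolge 0 with
  | some beste => (PySem.List.pyGet? butikker beste).getD ""
  | none => ""

-- ===== PRECONDITION & SPEC =====
-- Pre_ excludes: empty prisliste (A raises UnboundLocalError, B IndexError); a shopping-list item
-- missing from some price dict (KeyError in both); butikker shorter than prisliste, where the winning
-- index may be out of range (IndexError) — this is slightly wider than needed, excluding a few inputs
-- where the winning index happens to be in range (both programs then return the same value, see cites).
def Pre_finn_butikk (handleliste : List String) (prisliste : List (List (String × Int))) (butikker : List String) : Prop :=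
  prisliste ≠ [] ∧ prisliste.length ≤ butikker.length ∧
  ∀ d ∈ prisliste, ∀ v ∈ handleliste, v ∈ d.map Prod.fst
instance (handleliste : List String) (prisliste : List (List (String × Int))) (butikker : List String) : Decidable (Pre_finn_butikk handleliste prisliste butikker) := by unfold Pre_finn_butikk; infer_instance

def pvWitness_finn_butikk : List String × (List (List (String × Int))) × List String :=
  (["eple"], [[("eple", 3)], [("eple", 2)]], ["A", "B"])

def Spec_finn_butikk (handleliste : List String) (prisliste : List (List (String × Int))) (butikker : List String) (out : String) : Prop := out = finn_butikk_alt handleliste prisliste butikker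
instance (handleliste : List String) (prisliste : List (List (String × Int))) (butikker : List String) (out : String) : Decidable (Spec_finn_butikk handleliste prisliste butikker out) := by unfold Spec_finn_butikk; infer_instance

-- ===== CLAIM (what is proved, stated in full; the proofs are below) =====
def Claim_equal_finn_butikk : Prop := ∀ (handleliste : List String) (prisliste : List (List (String × Int))) (butikker : List String), Dom_finn_butikk handleliste prisliste butikker → Pre_finn_butikk handleliste prisliste butikker → Spec_finn_butikk handleliste prisliste butikker (finn_butikk handleliste prisliste butikker)

-- ===== LEMMAS AND PROOFS =====

-- A's loop step (the exact lambda of port A), B's item-major step, and the shared key, named for the proofs.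
def pvStepA (handleliste : List String) (prisliste : List (List (String × Int)))
    (st : Int × Int × Int) (i : Int) : Int × Int × Int :=
  let total := handleliste.foldl
    (fun t vare => t + ((((PySem.List.pyGet? prisliste i).getD []).lookup vare).getD 0)) st.1
  if i == 0 then (0, i, total)
  else if total < st.2.2 then (0, i, total)
  else (0, st.2.1, st.2.2)

def pvKey (handleliste : List String) (prisliste : List (List (String × Int))) (i : Int) : Int :=
  (PySem.List.pyGet? (prisliste.map
    (fun priser => (handleliste.map (fun vare => ((priser.lookup vare).getD 0))).sum)) i).getD 0

lemma pv_foldl_add (f : String → Int) (h : List String) :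
    ∀ init : Int, h.foldl (fun t v => t + f v) init = init + (h.map f).sum := by
  induction h with
  | nil => intro init; simp
  | cons x t ih => intro init; simp [List.foldl, ih]; ring

lemma pv_total_eq (handleliste : List String) (prisliste : List (List (String × Int)))
    (k : Nat) (hk : k < prisliste.length) :
    handleliste.foldl
      (fun t vare => t + ((((PySem.List.pyGet? prisliste (k : Int)).getD []).lookup vare).getD 0)) 0
    = pvKey handleliste prisliste (k : Int) := by
  have h1 : PySem.List.pyGet? prisliste (k : Int) = some prisliste[k] := by
    simp [PySem.List.pyGet?_natCast, List.getElem?_eq_getElem hk]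
  have h2 : PySem.List.pyGet? (prisliste.map
      (fun priser => (handleliste.map (fun vare => ((priser.lookup vare).getD 0))).sum)) (k : Int)
      = some ((handleliste.map (fun vare => ((prisliste[k].lookup vare).getD 0))).sum) := by
    have hk' : k < (prisliste.map
        (fun priser => (handleliste.map (fun vare => ((priser.lookup vare).getD 0))).sum)).length := by
      simpa using hk
    simp [PySem.List.pyGet?_natCast, List.getElem?_eq_getElem hk']
  rw [pv_foldl_add]
  simp [pvKey, h1, h2]

def pvMinStep (key : Int → Int) (acc : Option Int) (x : Int) : Option Int :=
  match acc with
  | none => some x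
  | some m => if key x < key m then some x else some m

lemma pv_min?_eq_foldl (xs : List Int) (key : Int → Int) :
    PySem.List.min? xs key = xs.foldl (pvMinStep key) none := by
  simp only [PySem.List.min?]
  refine List.foldl_ext _ _ none (fun acc x _ => ?_)
  cases acc <;> rfl

-- head of an insertion = the running-min step on the head (independent of sortedness of ys)
lemma pv_head_insertBy (key : Int → Int) (x : Int) (ys : List Int) :
    (PySem.List.insertBy (fun a b => decide (key a < key b)) x ys).head? = pvMinStep key ys.head? x := by
  cases ys with
  | nil => simp [PySem.List.insertBy, pvMinStep]
  | cons y t =>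
    simp only [PySem.List.insertBy, pvMinStep]
    by_cases h : key x < key y <;> simp [h]

lemma pv_head_foldl_insertBy (key : Int → Int) (xs : List Int) :
    ∀ acc : List Int,
      (xs.foldl (fun acc x => PySem.List.insertBy (fun a b => decide (key a < key b)) x acc) acc).head?
      = xs.foldl (pvMinStep key) acc.head? := by
  induction xs with
  | nil => intro acc; rfl
  | cons x t ih =>
    intro acc
    simp only [List.foldl, ih, pv_head_insertBy]

-- first element of the stable sort = first minimal element
lemma pv_head_sorted (xs : List Int) (key : Int → Int) :
    (PySem.List.sorted xs key false).head? = PySem.List.min? xs key := by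
  rw [PySem.List.sorted_eq_foldl_insertBy, pv_min?_eq_foldl, pv_head_foldl_insertBy]
  rfl

-- zip-map composition: updating a zipped-and-mapped vector and zipping again fuses
lemma pv_zip_map_zip (g h : Int → List (String × Int) → Int) :
    ∀ (acc : List Int) (pl : List (List (String × Int))),
      (((acc.zip pl).map (fun p => g p.1 p.2)).zip pl).map (fun p => h p.1 p.2)
      = (acc.zip pl).map (fun p => h (g p.1 p.2) p.2) := by
  intro acc
  induction acc with
  | nil => intro pl; simp
  | cons a t ih =>
    intro pl
    cases pl with
    | nil => simp
    | cons q qt =>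
      simp only [List.zip_cons_cons, List.map_cons, ih]

lemma pv_zip_fst (acc : List Int) :
    ∀ pl : List (List (String × Int)), acc.length = pl.length →
      (acc.zip pl).map (fun p => p.1) = acc := by
  induction acc with
  | nil => intro pl _; simp
  | cons a t ih =>
    intro pl hl
    cases pl with
    | nil => simp at hl
    | cons q qt =>
      simp only [List.zip_cons_cons, List.map_cons]
      rw [ih qt (by simpa using hl)]

-- B's item-major accumulation equals the zipped per-store sums
lemma pv_totals_fold (vs : List String) (pl : List (List (String × Int))) :
    ∀ acc : List Int, acc.length = pl.length →
      vs.foldl (fun tot vare => (tot.zip pl).map (fun p => p.1 + ((p.2.lookup vare).getD 0))) acc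
      = (acc.zip pl).map (fun p => p.1 + (vs.map (fun v => ((p.2.lookup v).getD 0))).sum) := by
  induction vs with
  | nil =>
    intro acc hl
    simp only [List.foldl, List.map_nil, List.sum_nil, add_zero]
    exact (pv_zip_fst acc pl hl).symm
  | cons v tl ih =>
    intro acc hl
    have hl' : ((acc.zip pl).map (fun p => p.1 + ((p.2.lookup v).getD 0))).length = pl.length := by
      simp [List.length_zip, hl]
    simp only [List.foldl]
    rw [ih _ hl', pv_zip_map_zip (fun x y => x + ((y.lookup v).getD 0))
      (fun x y => x + (tl.map (fun w => ((y.lookup w).getD 0))).sum)]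
    refine List.map_congr_left (fun p _ => ?_)
    simp [add_assoc]

lemma pv_totals_replicate (vs : List String) (pl : List (List (String × Int))) :
    ((List.replicate pl.length (0 : Int)).zip pl).map
        (fun p => p.1 + (vs.map (fun v => ((p.2.lookup v).getD 0))).sum)
      = pl.map (fun priser => (vs.map (fun v => ((priser.lookup v).getD 0))).sum) := by
  induction pl with
  | nil => simp
  | cons q qt ih =>
    simp only [List.length_cons, List.replicate_succ, List.zip_cons_cons, List.map_cons, ih,
      zero_add]

-- Main loop invariant: after processing range(0, k), A's state is (0, j, key j) and
-- the first minimum over the same range is some j, for the same index j.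
lemma pv_loop_inv (handleliste : List String) (prisliste : List (List (String × Int))) :
    ∀ k : Nat, 1 ≤ k → k ≤ prisliste.length →
    ∃ j : Int, 0 ≤ j ∧ j < (k : Int) ∧
      (PySem.List.pyRange 0 (k : Int) 1).foldl (pvStepA handleliste prisliste) (0, 0, 0)
        = (0, j, pvKey handleliste prisliste j) ∧
      PySem.List.min? (PySem.List.pyRange 0 (k : Int) 1) (pvKey handleliste prisliste) = some j := by
  intro k
  induction k with
  | zero => intro h; omega
  | succ k ih =>
    intro _ hle
    by_cases hk1 : 1 ≤ k
    · -- inductive step: range(0, k+1) = range(0, k) ++ [k]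
      obtain ⟨j, hj0, hjk, hA, hB⟩ := ih hk1 (by omega)
      have hsplit : PySem.List.pyRange 0 ((k : Int) + 1) 1
          = PySem.List.pyRange 0 (k : Int) 1 ++ [(k : Int)] := by
        exact PySem.List.pyRange_one_succ_right (by positivity)
      have hkcast : ((k + 1 : Nat) : Int) = (k : Int) + 1 := by push_cast; ring
      have hne : ((k : Int) == 0) = false := by
        simp; omega
      have htot := pv_total_eq handleliste prisliste k (by omega)
      have hmin : PySem.List.min? (PySem.List.pyRange 0 (k : Int) 1 ++ [(k : Int)])
          (pvKey handleliste prisliste)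
          = pvMinStep (pvKey handleliste prisliste)
              (PySem.List.min? (PySem.List.pyRange 0 (k : Int) 1) (pvKey handleliste prisliste))
              (k : Int) := by
        rw [pv_min?_eq_foldl, pv_min?_eq_foldl, List.foldl_append]; rfl
      by_cases hlt : pvKey handleliste prisliste (k : Int) < pvKey handleliste prisliste j
      · refine ⟨(k : Int), by positivity, by omega, ?_, ?_⟩
        · rw [hkcast, hsplit, List.foldl_append, hA]
          simp only [List.foldl, pvStepA, hne, Bool.false_eq_true, if_false, htot, hlt, if_pos]
        · rw [hkcast, hsplit, hmin, hB]
          simp [pvMinStep, hlt]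
      · refine ⟨j, hj0, by omega, ?_, ?_⟩
        · rw [hkcast, hsplit, List.foldl_append, hA]
          simp only [List.foldl, pvStepA, hne, Bool.false_eq_true, if_false, htot, hlt, if_false]
        · rw [hkcast, hsplit, hmin, hB]
          simp [pvMinStep, hlt]
    · -- base case k + 1 = 1 : range(0, 1) = [0]
      have hk0 : k = 0 := by omega
      subst hk0
      have htot := pv_total_eq handleliste prisliste 0 (by omega)
      refine ⟨0, le_refl 0, by norm_num, ?_, ?_⟩
      · have h1 : PySem.List.pyRange 0 ((1 : Nat) : Int) 1 = [0] := by
          simpa using PySem.List.pyRange_one_singleton (a := (0 : Int))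
        rw [h1]
        simp only [List.foldl, pvStepA]
        simpa using htot
      · have h1 : PySem.List.pyRange 0 ((1 : Nat) : Int) 1 = [0] := by
          simpa using PySem.List.pyRange_one_singleton (a := (0 : Int))
        rw [h1]
        simp [PySem.List.min?]

-- ===== VERDICT (by name: the statement is the Claim_ definition above) =====
theorem finn_butikk_spec : Claim_equal_finn_butikk := by
  intro handleliste prisliste butikker _ hpre
  obtain ⟨hne, _, _⟩ := hpre
  have hlen : 1 ≤ prisliste.length := List.length_pos_of_ne_nil hne
  obtain ⟨j, _, _, hA, hB⟩ := pv_loop_inv handleliste prisliste prisliste.length hlen (le_refl _)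
  show finn_butikk handleliste prisliste butikker = finn_butikk_alt handleliste prisliste butikker
  have hAeq : finn_butikk handleliste prisliste butikker
      = (PySem.List.pyGet? butikker ((PySem.List.pyRange 0 (prisliste.length : Int) 1).foldl
          (pvStepA handleliste prisliste) (0, 0, 0)).2.1).getD "" := rfl
  -- rewrite B's totals vector into the per-store sums, then its selection into min?
  have htot : handleliste.foldl
      (fun tot vare => (tot.zip prisliste).map (fun p => p.1 + ((p.2.lookup vare).getD 0)))
      (List.replicate prisliste.length (0 : Int))
      = prisliste.map (fun priser => (handleliste.map (fun v => ((priser.lookup v).getD 0))).sum) := by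
    rw [pv_totals_fold _ _ _ (by simp), pv_totals_replicate]
  have hhead : PySem.List.pyGet?
      (PySem.List.sorted (PySem.List.pyRange 0 (prisliste.length : Int) 1)
        (pvKey handleliste prisliste) false) 0
      = some j := by
    have h0 : PySem.List.pyGet?
        (PySem.List.sorted (PySem.List.pyRange 0 (prisliste.length : Int) 1)
          (pvKey handleliste prisliste) false) 0
        = (PySem.List.sorted (PySem.List.pyRange 0 (prisliste.length : Int) 1)
            (pvKey handleliste prisliste) false).head? := by
      have := PySem.List.pyGet?_natCast
        (PySem.List.sorted (PySem.List.pyRange 0 (prisliste.length : Int) 1)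
          (pvKey handleliste prisliste) false) 0
      simpa [List.head?_eq_getElem?] using this
    rw [h0, pv_head_sorted, hB]
  have hBeq : finn_butikk_alt handleliste prisliste butikker
      = match PySem.List.pyGet?
          (PySem.List.sorted (PySem.List.pyRange 0 (prisliste.length : Int) 1)
            (pvKey handleliste prisliste) false) 0 with
        | some beste => (PySem.List.pyGet? butikker beste).getD ""
        | none => "" := by
    simp only [finn_butikk_alt, htot]
    rfl
  rw [hAeq, hBeq, hA, hhead]
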